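-- pv_equiv track=rewrite | github.com/CMU-cabot/cabot-app-server | cabot_app_server/webui/tour_manager.py | build_node_names
-- ===== SOURCE A (Python) =====
-- def build_node_names(features):
--     result = {}
--     for lang in ['ja', 'en', 'zh-CN']:
--         node_names = {}
--         for feature in features:
--             p = feature.get("properties") or {}
--             if p.get("facil_id"):
--                 name = p.get(f"name_{lang}")
--                 if name:
--                     for i in range(1, 10):
--                         node = p.get(f"ent{i}_node")
--                         if node:
--                             ent_name = p.get(f"ent{i}_n")
--                             if ent_name:
--                                 node_names[node] = f"{name} {ent_name}"
--                             else:
--                                 node_names[node] = name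
--
--         result[lang] = node_names
--     return result
-- ===== SOURCE B (Python) =====
-- def build_node_names(features):
--     result = {'ja': {}, 'en': {}, 'zh-CN': {}}
--     for feature in features:
--         p = feature.get("properties") or {}
--         if not p.get("facil_id"):
--             continue
--         names = {lang: p.get(f"name_{lang}") for lang in result}
--         for i in range(1, 10):
--             node = p.get(f"ent{i}_node")
--             if not node:
--                 continue
--             ent_name = p.get(f"ent{i}_n")
--             for lang, name in names.items():
--                 if name:
--                     result[lang][node] = f"{name} {ent_name}" if ent_name else name
--     return result
-- ===== Notes on version B (the rewrite author's own statement) =====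
-- stated objective: alternative
-- what changed: B makes a single fused pass over the features (maintaining the three per-language maps together) instead of A's three independent scans of the feature list, checking facil_id and fetching each entrance node/name once per feature instead of once per language.
import Mathlib
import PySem

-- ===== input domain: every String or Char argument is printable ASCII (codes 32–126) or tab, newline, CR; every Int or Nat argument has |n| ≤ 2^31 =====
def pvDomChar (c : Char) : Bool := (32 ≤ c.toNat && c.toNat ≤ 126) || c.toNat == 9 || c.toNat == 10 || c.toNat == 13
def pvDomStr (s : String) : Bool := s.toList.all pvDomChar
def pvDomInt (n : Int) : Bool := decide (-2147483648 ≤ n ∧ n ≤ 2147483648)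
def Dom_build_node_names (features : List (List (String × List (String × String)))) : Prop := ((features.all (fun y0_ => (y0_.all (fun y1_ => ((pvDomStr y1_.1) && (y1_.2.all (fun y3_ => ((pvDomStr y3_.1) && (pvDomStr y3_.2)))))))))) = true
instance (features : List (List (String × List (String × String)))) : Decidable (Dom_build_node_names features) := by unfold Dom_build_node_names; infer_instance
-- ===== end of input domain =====

-- B fuses A's three per-language scans of the feature list into one pass that
-- maintains the three node-name maps together (alternative decomposition, same cost class).


-- ===== PORT A =====
-- p.get(k): first-match lookup; a missing key and the value "" are both falsy, so the
-- truthiness test 'if p.get(k):' is exactly 'pvGetS p k ≠ ""' (values here are strings).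
def pvGetS (p : List (String × String)) (k : String) : String :=
  ((PySem.Dict.mk p).get? k).getD ""

-- A's inner 'for i in range(1, 10)' loop, for one feature and one language's name
def pvEntLoopA (p : List (String × String)) (name : String)
    (nn : PySem.Dict String String) : PySem.Dict String String :=
  (PySem.List.pyRange 1 10 1).foldl (fun nn i =>
    let node := pvGetS p ("ent" ++ PySem.Int.toStr i ++ "_node")
    if node ≠ "" then
      let ent_name := pvGetS p ("ent" ++ PySem.Int.toStr i ++ "_n")
      if ent_name ≠ "" then nn.insert node (name ++ " " ++ ent_name)
      else nn.insert node name
    else nn) nn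

-- A's body of 'for feature in features' for a fixed lang
def pvStepA (lang : String) (nn : PySem.Dict String String)
    (feature : List (String × List (String × String))) : PySem.Dict String String :=
  let p := (((PySem.Dict.mk feature).get? "properties").getD [])
  if pvGetS p "facil_id" ≠ "" then
    let name := pvGetS p ("name_" ++ lang)
    if name ≠ "" then pvEntLoopA p name nn else nn
  else nn

-- result[lang] = node_names: the three langs are distinct fresh keys, so the dict append is literal
def build_node_names (features : List (List (String × List (String × String)))) : List (String × List (String × String)) :=
  (["ja", "en", "zh-CN"]).foldl (fun result lang =>
    result ++ [(lang, (features.foldl (pvStepA lang) PySem.Dict.empty).items)]) []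

-- ===== PORT B =====
-- B: 'if name: result[lang][node] = f"{name} {ent_name}" if ent_name else name'
def pvUpd (name : String) (d : PySem.Dict String String) (node ent_name : String) : PySem.Dict String String :=
  if name ≠ "" then
    d.insert node (if ent_name ≠ "" then name ++ " " ++ ent_name else name)
  else d

-- B's body of 'for feature in features': one pass, all three languages at once
def pvStepB (t : PySem.Dict String String × PySem.Dict String String × PySem.Dict String String)
    (feature : List (String × List (String × String))) :
    PySem.Dict String String × PySem.Dict String String × PySem.Dict String String :=
  let p := (((PySem.Dict.mk feature).get? "properties").getD [])
  if pvGetS p "facil_id" ≠ "" then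
    let nja := pvGetS p "name_ja"
    let nen := pvGetS p "name_en"
    let nzh := pvGetS p "name_zh-CN"
    (PySem.List.pyRange 1 10 1).foldl (fun t i =>
      let node := pvGetS p ("ent" ++ PySem.Int.toStr i ++ "_node")
      if node ≠ "" then
        let ent_name := pvGetS p ("ent" ++ PySem.Int.toStr i ++ "_n")
        (pvUpd nja t.1 node ent_name, pvUpd nen t.2.1 node ent_name, pvUpd nzh t.2.2 node ent_name)
      else t) t
  else t

def build_node_names_alt (features : List (List (String × List (String × String)))) : List (String × List (String × String)) :=
  let t := features.foldl pvStepB (PySem.Dict.empty, PySem.Dict.empty, PySem.Dict.empty)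
  [("ja", t.1.items), ("en", t.2.1.items), ("zh-CN", t.2.2.items)]

-- ===== PRECONDITION & SPEC =====
def Spec_build_node_names (features : List (List (String × List (String × String)))) (out : List (String × List (String × String))) : Prop := out = build_node_names_alt features
instance (features : List (List (String × List (String × String)))) (out : List (String × List (String × String))) : Decidable (Spec_build_node_names features out) := by unfold Spec_build_node_names; infer_instance

-- ===== CLAIM (what is proved, stated in full; the proofs are below) =====
def Claim_equal_build_node_names : Prop := ∀ (features : List (List (String × List (String × String)))), Dom_build_node_names features → Spec_build_node_names features (build_node_names features)

-- ===== LEMMAS AND PROOFS =====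

-- a fold whose step acts componentwise on a triple is the triple of the component folds
theorem pv_foldl_triple {α σ : Type} (f g h : σ → α → σ) (xs : List α) :
    ∀ a b c : σ,
      xs.foldl (fun t x => (f t.1 x, g t.2.1 x, h t.2.2 x)) (a, b, c)
        = (xs.foldl f a, xs.foldl g b, xs.foldl h c) := by
  induction xs with
  | nil => intro a b c; rfl
  | cons x xs ih => intro a b c; simp [List.foldl, ih]

-- with an empty name, B's per-language update does nothing at all
theorem pv_entLoop_name_empty (p : List (String × String))
    (d : PySem.Dict String String) :
    (PySem.List.pyRange 1 10 1).foldl (fun d i =>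
      if pvGetS p ("ent" ++ PySem.Int.toStr i ++ "_node") ≠ "" then
        pvUpd "" d (pvGetS p ("ent" ++ PySem.Int.toStr i ++ "_node")) (pvGetS p ("ent" ++ PySem.Int.toStr i ++ "_n"))
      else d) d = d := by
  have : (fun (d : PySem.Dict String String) (i : Int) =>
      if pvGetS p ("ent" ++ PySem.Int.toStr i ++ "_node") ≠ "" then
        pvUpd "" d (pvGetS p ("ent" ++ PySem.Int.toStr i ++ "_node")) (pvGetS p ("ent" ++ PySem.Int.toStr i ++ "_n"))
      else d) = (fun d _ => d) := by
    funext d i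
    simp [pvUpd]
  rw [this]
  exact List.foldl_fixed _

-- with a nonempty name, B's per-language inner loop is A's inner loop
theorem pv_entLoop_name_nonempty (p : List (String × String)) (name : String)
    (hname : name ≠ "") (d : PySem.Dict String String) :
    (PySem.List.pyRange 1 10 1).foldl (fun d i =>
      if pvGetS p ("ent" ++ PySem.Int.toStr i ++ "_node") ≠ "" then
        pvUpd name d (pvGetS p ("ent" ++ PySem.Int.toStr i ++ "_node")) (pvGetS p ("ent" ++ PySem.Int.toStr i ++ "_n"))
      else d) d = pvEntLoopA p name d := by
  unfold pvEntLoopA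
  congr 1
  funext d i
  dsimp only
  simp only [pvUpd, hname, ne_eq, not_false_iff, if_pos]
  split <;> [skip; rfl]
  split <;> rfl

-- B's per-language inner loop, as A's per-language inner body
theorem pv_comp (p : List (String × String)) (name : String) (d : PySem.Dict String String) :
    (PySem.List.pyRange 1 10 1).foldl (fun d i =>
      if pvGetS p ("ent" ++ PySem.Int.toStr i ++ "_node") ≠ "" then
        pvUpd name d (pvGetS p ("ent" ++ PySem.Int.toStr i ++ "_node")) (pvGetS p ("ent" ++ PySem.Int.toStr i ++ "_n"))
      else d) d = if name ≠ "" then pvEntLoopA p name d else d := by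
  by_cases hn : name ≠ ""
  · rw [if_pos hn]; exact pv_entLoop_name_nonempty p name hn d
  · rw [if_neg hn]
    rw [not_not] at hn
    subst hn
    exact pv_entLoop_name_empty p d

-- B's fused feature step is A's feature step applied to each component
theorem pv_stepB_componentwise (t : PySem.Dict String String × PySem.Dict String String × PySem.Dict String String)
    (feature : List (String × List (String × String))) :
    pvStepB t feature = (pvStepA "ja" t.1 feature, pvStepA "en" t.2.1 feature, pvStepA "zh-CN" t.2.2 feature) := by
  obtain ⟨a, b, c⟩ := t
  unfold pvStepB pvStepA
  have hja : ("name_" ++ "ja" : String) = "name_ja" := rfl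
  have hen : ("name_" ++ "en" : String) = "name_en" := rfl
  have hzh : ("name_" ++ "zh-CN" : String) = "name_zh-CN" := rfl
  rw [hja, hen, hzh]
  set p := (((PySem.Dict.mk feature).get? "properties").getD []) with hp
  by_cases hf : pvGetS p "facil_id" ≠ ""
  · rw [if_pos hf, if_pos hf, if_pos hf, if_pos hf]
    rw [← pv_comp p (pvGetS p "name_ja") a, ← pv_comp p (pvGetS p "name_en") b,
        ← pv_comp p (pvGetS p "name_zh-CN") c]
    dsimp only
    have hstep :
        (fun (t : PySem.Dict String String × PySem.Dict String String × PySem.Dict String String) (i : Int) =>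
          if pvGetS p ("ent" ++ PySem.Int.toStr i ++ "_node") ≠ "" then
            (pvUpd (pvGetS p "name_ja") t.1 (pvGetS p ("ent" ++ PySem.Int.toStr i ++ "_node")) (pvGetS p ("ent" ++ PySem.Int.toStr i ++ "_n")),
             pvUpd (pvGetS p "name_en") t.2.1 (pvGetS p ("ent" ++ PySem.Int.toStr i ++ "_node")) (pvGetS p ("ent" ++ PySem.Int.toStr i ++ "_n")),
             pvUpd (pvGetS p "name_zh-CN") t.2.2 (pvGetS p ("ent" ++ PySem.Int.toStr i ++ "_node")) (pvGetS p ("ent" ++ PySem.Int.toStr i ++ "_n")))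
          else t)
        = (fun t i =>
            ((fun d i =>
              if pvGetS p ("ent" ++ PySem.Int.toStr i ++ "_node") ≠ "" then
                pvUpd (pvGetS p "name_ja") d (pvGetS p ("ent" ++ PySem.Int.toStr i ++ "_node")) (pvGetS p ("ent" ++ PySem.Int.toStr i ++ "_n"))
              else d) t.1 i,
             (fun d i =>
              if pvGetS p ("ent" ++ PySem.Int.toStr i ++ "_node") ≠ "" then
                pvUpd (pvGetS p "name_en") d (pvGetS p ("ent" ++ PySem.Int.toStr i ++ "_node")) (pvGetS p ("ent" ++ PySem.Int.toStr i ++ "_n"))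
              else d) t.2.1 i,
             (fun d i =>
              if pvGetS p ("ent" ++ PySem.Int.toStr i ++ "_node") ≠ "" then
                pvUpd (pvGetS p "name_zh-CN") d (pvGetS p ("ent" ++ PySem.Int.toStr i ++ "_node")) (pvGetS p ("ent" ++ PySem.Int.toStr i ++ "_n"))
              else d) t.2.2 i)) := by
      funext t i
      dsimp only
      split <;> rfl
    rw [hstep]
    exact pv_foldl_triple
      (fun d i =>
      if pvGetS p ("ent" ++ PySem.Int.toStr i ++ "_node") ≠ "" then
        pvUpd (pvGetS p "name_ja") d (pvGetS p ("ent" ++ PySem.Int.toStr i ++ "_node")) (pvGetS p ("ent" ++ PySem.Int.toStr i ++ "_n"))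
      else d)
      (fun d i =>
      if pvGetS p ("ent" ++ PySem.Int.toStr i ++ "_node") ≠ "" then
        pvUpd (pvGetS p "name_en") d (pvGetS p ("ent" ++ PySem.Int.toStr i ++ "_node")) (pvGetS p ("ent" ++ PySem.Int.toStr i ++ "_n"))
      else d)
      (fun d i =>
      if pvGetS p ("ent" ++ PySem.Int.toStr i ++ "_node") ≠ "" then
        pvUpd (pvGetS p "name_zh-CN") d (pvGetS p ("ent" ++ PySem.Int.toStr i ++ "_node")) (pvGetS p ("ent" ++ PySem.Int.toStr i ++ "_n"))
      else d)
      (PySem.List.pyRange 1 10 1) a b c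
  · rw [if_neg hf, if_neg hf, if_neg hf, if_neg hf]

-- ===== VERDICT (by name: the statement is the Claim_ definition above) =====
theorem build_node_names_spec : Claim_equal_build_node_names := by
  intro features _
  unfold Spec_build_node_names build_node_names build_node_names_alt
  have hB : features.foldl pvStepB (PySem.Dict.empty, PySem.Dict.empty, PySem.Dict.empty)
      = (features.foldl (pvStepA "ja") PySem.Dict.empty,
         features.foldl (pvStepA "en") PySem.Dict.empty,
         features.foldl (pvStepA "zh-CN") PySem.Dict.empty) := by
    have : pvStepB = (fun t x => (pvStepA "ja" t.1 x, pvStepA "en" t.2.1 x, pvStepA "zh-CN" t.2.2 x)) := by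
      funext t x; exact pv_stepB_componentwise t x
    rw [this, pv_foldl_triple]
  simp [List.foldl, hB]
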